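-- pv_equiv track=rewrite | github.com/Mozhi21/oa_amazon | q4.py | distribute_packages
-- ===== SOURCE A (Python) =====
-- def distribute_packages(trucks:list[int], to_load:int) -> int:
--     curr_max_load = max(trucks)
--     un_even_loads = sum([curr_max_load - i for i in trucks])
--     if un_even_loads >= to_load:
--         return curr_max_load
--
--     remain_load = to_load - un_even_loads
--     each_truck_adder = remain_load // (len(trucks))
--     if remain_load % len(trucks):
--         each_truck_adder +=1
--
--     return each_truck_adder + curr_max_load
-- ===== SOURCE B (Python) =====
-- def distribute_packages(trucks: list[int], to_load: int) -> int:
--     lo = max(trucks)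
--     hi = lo + max(to_load, 0)
--     # binary search for the smallest uniform level whose capacity covers to_load
--     while lo < hi:
--         mid = (lo + hi) // 2
--         if sum(mid - t for t in trucks) >= to_load:
--             hi = mid
--         else:
--             lo = mid + 1
--     return lo
-- ===== Notes on version B (the rewrite author's own statement) =====
-- stated objective: alternative
-- what changed: Replaces A's slack-sum plus remainder/ceiling arithmetic with a binary search over target levels: the answer is the smallest uniform level L >= max(trucks) whose capacity sum(L - t) covers to_load, found by bisection on [max(trucks), max(trucks)+max(to_load,0)].
import Mathlib
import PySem

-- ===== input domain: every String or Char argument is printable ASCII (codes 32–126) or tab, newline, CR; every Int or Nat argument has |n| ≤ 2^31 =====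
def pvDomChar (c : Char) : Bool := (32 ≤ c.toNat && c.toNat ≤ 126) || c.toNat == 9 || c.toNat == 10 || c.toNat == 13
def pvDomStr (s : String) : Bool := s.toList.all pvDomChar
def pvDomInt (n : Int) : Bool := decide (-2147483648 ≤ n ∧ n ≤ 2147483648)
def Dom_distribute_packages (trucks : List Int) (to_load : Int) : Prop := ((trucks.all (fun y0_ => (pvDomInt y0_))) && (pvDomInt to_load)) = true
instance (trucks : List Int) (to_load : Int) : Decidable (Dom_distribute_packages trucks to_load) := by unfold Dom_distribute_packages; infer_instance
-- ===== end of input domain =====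

-- B replaces A's slack/ceiling arithmetic with a binary search for the smallest uniform level whose capacity covers to_load; objective: alternative.


-- ===== PORT A =====
def distribute_packages (trucks : List Int) (to_load : Int) : Int :=
  match PySem.List.max? trucks (fun y => y) with
  | none => 0  -- unreachable: Pre_ excludes the empty list, where Python raises ValueError
  | some curr_max_load =>
    let un_even_loads := (trucks.map (fun i => curr_max_load - i)).sum
    if un_even_loads ≥ to_load then curr_max_load
    else
      let remain_load := to_load - un_even_loads
      let each_truck_adder := PySem.Int.floordiv remain_load (trucks.length : Int)
      let each_truck_adder :=
        if PySem.Int.mod remain_load (trucks.length : Int) ≠ 0 then each_truck_adder + 1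
        else each_truck_adder
      each_truck_adder + curr_max_load

-- ===== PORT B =====
-- the while-loop of Source B: binary search over the level, state (lo, hi)
def pvBsearch (trucks : List Int) (to_load : Int) (lo hi : Int) : Int :=
  if h : lo < hi then
    let mid := PySem.Int.floordiv (lo + hi) 2
    if (trucks.map (fun t => mid - t)).sum ≥ to_load then
      pvBsearch trucks to_load lo mid
    else
      pvBsearch trucks to_load (mid + 1) hi
  else lo
termination_by (hi - lo).toNat
decreasing_by
  · have h2 : (0:Int) < 2 := by norm_num
    have := (PySem.Int.floordiv_lt_iff_lt_mul (a := lo + hi) (b := 2) (q := hi) h2).mpr (by omega)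
    omega
  · have h2 : (0:Int) < 2 := by norm_num
    have := (PySem.Int.le_floordiv_iff_mul_le (a := lo + hi) (b := 2) (q := lo) h2).mpr (by omega)
    omega

def distribute_packages_alt (trucks : List Int) (to_load : Int) : Int :=
  match PySem.List.max? trucks (fun y => y) with
  | none => 0  -- unreachable: Pre_ excludes the empty list, where Python raises ValueError
  | some lo =>
    let hi := lo + max to_load 0
    pvBsearch trucks to_load lo hi

-- ===== PRECONDITION & SPEC =====
-- Pre_ excludes exactly the empty truck list, on which Python's max([]) raises ValueError (in both A and B).
def Pre_distribute_packages (trucks : List Int) (to_load : Int) : Prop := trucks ≠ []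
instance (trucks : List Int) (to_load : Int) : Decidable (Pre_distribute_packages trucks to_load) := by unfold Pre_distribute_packages; infer_instance
def pvWitness_distribute_packages : List Int × Int := ([3, 1, 2], 7)

def Spec_distribute_packages (trucks : List Int) (to_load : Int) (out : Int) : Prop := out = distribute_packages_alt trucks to_load
instance (trucks : List Int) (to_load : Int) (out : Int) : Decidable (Spec_distribute_packages trucks to_load out) := by unfold Spec_distribute_packages; infer_instance

-- ===== CLAIM =====
def Claim_equal_distribute_packages : Prop := ∀ (trucks : List Int) (to_load : Int), Dom_distribute_packages trucks to_load → Pre_distribute_packages trucks to_load → Spec_distribute_packages trucks to_load (distribute_packages trucks to_load)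

-- ===== LEMMAS AND PROOFS =====

theorem pv_map_sub_sum (l : List Int) (c : Int) :
    (l.map (fun i => c - i)).sum = (l.length : Int) * c - l.sum := by
  induction l with
  | nil => simp
  | cons x t ih => simp [ih]; ring

-- the binary search returns T whenever lo ≤ T ≤ hi and feasibility of a level L ≥ lo is exactly T ≤ L
theorem pvBsearch_eq (trucks : List Int) (to_load : Int) :
    ∀ (k : Nat) (lo hi T : Int), (hi - lo).toNat ≤ k → lo ≤ T → T ≤ hi →
      (∀ L, lo ≤ L → (((trucks.map (fun t => L - t)).sum ≥ to_load) ↔ T ≤ L)) →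
      pvBsearch trucks to_load lo hi = T := by
  intro k
  induction k with
  | zero =>
    intro lo hi T hk hloT hThi _
    rw [pvBsearch]
    have : ¬ lo < hi := by omega
    simp [this]; omega
  | succ k ih =>
    intro lo hi T hk hloT hThi hfeas
    rw [pvBsearch]
    by_cases h : lo < hi
    · simp only [h, dif_pos]
      have h2 : (0:Int) < 2 := by norm_num
      set mid := PySem.Int.floordiv (lo + hi) 2 with hmid
      have hlomid : lo ≤ mid := (PySem.Int.le_floordiv_iff_mul_le h2).mpr (by omega)
      have hmidhi : mid < hi := (PySem.Int.floordiv_lt_iff_lt_mul h2).mpr (by omega)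
      by_cases hf : (trucks.map (fun t => mid - t)).sum ≥ to_load
      · have hTmid : T ≤ mid := (hfeas mid hlomid).mp hf
        simp only [hf, if_pos]
        exact ih lo mid T (by omega) hloT hTmid hfeas
      · have hmidT : mid < T := by
          by_contra hc
          exact hf ((hfeas mid hlomid).mpr (by omega))
        simp only [hf]
        exact ih (mid + 1) hi T (by omega) (by omega) hThi
          (fun L hL => hfeas L (by omega))
    · simp [h]; omega

-- ceil(a/n) as -((-a)//n) equals floor(a/n) plus 1 when n does not divide a
theorem pv_ceil_eq (a n : Int) (hn : 0 < n) :
    -(PySem.Int.floordiv (-a) n) =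
      PySem.Int.floordiv a n + (if PySem.Int.mod a n ≠ 0 then 1 else 0) := by
  rw [PySem.Int.neg_floordiv_neg_eq_iff_of_pos hn]
  have hdm := PySem.Int.floordiv_mul_add_mod a n
  have hm0 := PySem.Int.mod_nonneg a hn
  have hml := PySem.Int.mod_lt a hn
  by_cases h : PySem.Int.mod a n = 0
  · simp [h]; constructor <;> nlinarith
  · have hm' : 0 < PySem.Int.mod a n := lt_of_le_of_ne hm0 (Ne.symm h)
    simp [h]; constructor <;> nlinarith

-- ===== VERDICT =====
theorem distribute_packages_spec : Claim_equal_distribute_packages := by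
  intro trucks to_load _ hpre
  unfold Spec_distribute_packages distribute_packages distribute_packages_alt
  obtain ⟨x, t, rfl⟩ : ∃ x t, trucks = x :: t := by
    cases trucks with
    | nil => exact absurd rfl hpre
    | cons x t => exact ⟨x, t, rfl⟩
  rw [PySem.List.max?_id_cons]
  set c := t.foldl max x with hc
  set n : Int := (((x :: t).length : Nat) : Int) with hn
  have hnpos : 0 < n := by rw [hn]; exact_mod_cast Nat.succ_pos t.length
  set S := (x :: t).sum with hS
  -- every truck load is at most c, hence S ≤ n * c
  have hSle : S ≤ n * c := by
    have hmax := PySem.List.le_foldl_max t x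
    have : ∀ y ∈ x :: t, y ≤ c := by
      intro y hy
      rcases List.mem_cons.mp hy with rfl | hy'
      · exact hmax.1
      · exact hmax.2 y hy'
    have := List.sum_le_card_nsmul (x :: t) c this
    simpa [hS, hn, nsmul_eq_mul, mul_comm] using this
  set C := -(PySem.Int.floordiv (-(S + to_load)) n) with hC
  have hX := (PySem.Int.neg_floordiv_neg_eq_iff_of_pos (a := S + to_load) hnpos).mp hC.symm
  dsimp only
  -- B's binary search returns max c C
  have hB : pvBsearch (x :: t) to_load c (c + max to_load 0) = max c C := by
    have hThi : max c C ≤ c + max to_load 0 := by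
      have hCle : C ≤ c + max to_load 0 := by
        by_contra hcc
        have h1 : c + max to_load 0 ≤ C - 1 := by omega
        have h2 : S + to_load ≤ n * (c + max to_load 0) := by
          nlinarith [le_max_left to_load 0, le_max_right to_load 0]
        nlinarith [hX.1]
      have : (0:Int) ≤ max to_load 0 := le_max_right _ _
      omega
    refine pvBsearch_eq (x :: t) to_load ((c + max to_load 0 - c).toNat) c
      (c + max to_load 0) (max c C) (by omega) (le_max_left _ _) hThi ?_
    intro L hL
    rw [pv_map_sub_sum _ L]
    constructor
    · intro hfe
      have hCL : C ≤ L := by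
        by_contra hcc
        have : L ≤ C - 1 := by omega
        nlinarith [hX.1]
      omega
    · intro hTL
      have hCL : C ≤ L := le_trans (le_max_right c C) hTL
      nlinarith [hX.2]
  rw [hB]
  -- A's closed-form value also equals max c C
  have hun : ((x :: t).map (fun i => c - i)).sum = n * c - S := pv_map_sub_sum _ c
  simp only [hun]
  by_cases hb : n * c - S ≥ to_load
  · have hle : C ≤ c := by
      by_contra hcc
      have : c ≤ C - 1 := by omega
      nlinarith [hX.1]
    simp [hb]; omega
  · have hY := (PySem.Int.neg_floordiv_neg_eq_iff_of_pos
      (a := to_load - (n * c - S)) hnpos).mp rfl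
    have hce := pv_ceil_eq (to_load - (n * c - S)) n hnpos
    have hceil : C = c + -(PySem.Int.floordiv (-(to_load - (n * c - S))) n) := by
      rw [hC, PySem.Int.neg_floordiv_neg_eq_iff_of_pos hnpos]
      constructor <;> nlinarith [hY.1, hY.2]
    have hge : 1 ≤ -(PySem.Int.floordiv (-(to_load - (n * c - S))) n) := by
      nlinarith [hY.2]
    have hmax : max c C = c + -(PySem.Int.floordiv (-(to_load - (n * c - S))) n) := by
      rw [hceil]; exact max_eq_right (by omega)
    rw [hmax, hce] at *
    simp [hb]
    split_ifs with h <;> omega
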